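-- pv_equiv track=rewrite | github.com/kaust-ark/ARK | ark/cli.py | _dedup_tail
-- ===== SOURCE A (Python) =====
-- def _dedup_tail(lines: list, n: int = 15) -> list:
--     """Get last n non-duplicate, non-empty lines."""
--     seen = set()
--     result = []
--     for line in reversed(lines):
--         stripped = line.strip()
--         if not stripped:
--             continue
--         # Normalize whitespace for dedup
--         key = " ".join(stripped.split())
--         if key not in seen:
--             seen.add(key)
--             result.append(line)
--             if len(result) >= n:
--                 break
--     result.reverse()
--     return result
-- ===== SOURCE B (Python) =====
-- def _dedup_tail(lines: list, n: int = 15) -> list: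
--     """Get last n non-duplicate, non-empty lines."""
--     if n <= 0:
--         return []
--     seen = {}
--     for line in lines:
--         stripped = line.strip()
--         if not stripped:
--             continue
--         key = " ".join(stripped.split())
--         seen.pop(key, None)
--         seen[key] = line
--     return list(seen.values())[-n:]
-- ===== Notes on version B (the rewrite author's own statement) =====
-- stated objective: alternative
-- what changed: A scans the lines backwards with a set of seen normalized keys and an early break once n lines are collected, then reverses; B makes one forward pass maintaining an insertion-ordered dict keyed by the normalized line (pop+reinsert keeps each key at its last occurrence) and returns one tail slice of its values.
-- intended difference: For n <= 0 with at least one non-blank line, A still returns one line (its break test runs only after the first append), while B returns an empty list, the intended result of asking for at most n <= 0 lines. — e.g. on _dedup_tail(["a"], 0): A returns ["a"], B returns []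
import Mathlib
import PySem

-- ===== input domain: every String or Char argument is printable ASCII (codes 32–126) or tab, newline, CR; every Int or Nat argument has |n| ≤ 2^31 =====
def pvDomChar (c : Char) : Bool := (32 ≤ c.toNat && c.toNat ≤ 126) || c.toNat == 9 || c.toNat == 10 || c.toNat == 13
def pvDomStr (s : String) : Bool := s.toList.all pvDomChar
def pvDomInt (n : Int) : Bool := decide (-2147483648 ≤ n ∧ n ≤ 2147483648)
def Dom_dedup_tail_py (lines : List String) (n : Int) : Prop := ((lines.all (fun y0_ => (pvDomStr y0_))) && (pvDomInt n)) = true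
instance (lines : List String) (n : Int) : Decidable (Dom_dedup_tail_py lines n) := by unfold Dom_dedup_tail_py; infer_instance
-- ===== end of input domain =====

-- B replaces A's backward scan with early break (set of seen keys, collect then reverse) by a single
-- forward pass over an insertion-ordered dict keyed by the normalized line (pop+reinsert keeps each
-- key at its last occurrence) followed by one tail slice; same cost class, different decomposition.
-- For n ≤ 0 B returns no lines (the intended result) where A accidentally returns one line; see D_ below.

-- ===== PORT A =====
-- the 'for line in reversed(lines): … break' loop of A, with its early exit
def dedupTailLoopA (rev : List String) (seen : PySem.Set String)
    (result : List String) (n : Int) : List String :=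
  match rev with
  | [] => result
  | line :: rest =>
    let stripped := PySem.Str.strip line
    if stripped = "" then dedupTailLoopA rest seen result n
    else
      let key := PySem.Str.join " " (PySem.Str.split₀ stripped)
      if PySem.Set.contains seen key then dedupTailLoopA rest seen result n
      else
        let result' := result ++ [line]
        if n ≤ (result'.length : Int) then result'
        else dedupTailLoopA rest (PySem.Set.add seen key) result' n

def dedup_tail_py (lines : List String) (n : Int) : List String :=
  (dedupTailLoopA lines.reverse PySem.Set.empty [] n).reverse

-- ===== PORT B =====
def dedup_tail_py_alt (lines : List String) (n : Int) : List String :=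
  if n ≤ 0 then []
  else
    let seen := lines.foldl (fun d line =>
      let stripped := PySem.Str.strip line
      if stripped = "" then d
      else
        let key := PySem.Str.join " " (PySem.Str.split₀ stripped)
        (PySem.Dict.erase d key).insert key line) (PySem.Dict.empty : PySem.Dict String String)
    PySem.List.slice seen.values (some (-n)) none

-- ===== PRECONDITION & SPEC =====
-- For n ≤ 0 with at least one non-blank line, A still returns one line (its break test runs only
-- after the first append), while B returns an empty list, the intended result of asking for at most n ≤ 0 lines.
def D_dedup_tail_py (lines : List String) (n : Int) : Prop :=
  n ≤ 0 ∧ (lines.any (fun l => !(PySem.Str.strip l == ""))) = true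
instance (lines : List String) (n : Int) : Decidable (D_dedup_tail_py lines n) := by unfold D_dedup_tail_py; infer_instance

def Spec_dedup_tail_py (lines : List String) (n : Int) (out : List String) : Prop :=
  ¬ D_dedup_tail_py lines n → out = dedup_tail_py_alt lines n
instance (lines : List String) (n : Int) (out : List String) : Decidable (Spec_dedup_tail_py lines n out) := by unfold Spec_dedup_tail_py; infer_instance

def pvDiffWitness_dedup_tail_py : List String × Int := (["a"], 0)
def pvDiffWitnessOut_dedup_tail_py : (List String) × (List String) := (["a"], [])

-- ===== CLAIM (what is proved, stated in full; the proofs are below) =====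
def Claim_unchanged_dedup_tail_py : Prop := ∀ (lines : List String) (n : Int), Dom_dedup_tail_py lines n → Spec_dedup_tail_py lines n (dedup_tail_py lines n)
def Claim_changed_dedup_tail_py : Prop := Dom_dedup_tail_py (pvDiffWitness_dedup_tail_py.1) (pvDiffWitness_dedup_tail_py.2) ∧ D_dedup_tail_py (pvDiffWitness_dedup_tail_py.1) (pvDiffWitness_dedup_tail_py.2) ∧ dedup_tail_py (pvDiffWitness_dedup_tail_py.1) (pvDiffWitness_dedup_tail_py.2) = pvDiffWitnessOut_dedup_tail_py.1 ∧ dedup_tail_py_alt (pvDiffWitness_dedup_tail_py.1) (pvDiffWitness_dedup_tail_py.2) = pvDiffWitnessOut_dedup_tail_py.2 ∧ pvDiffWitnessOut_dedup_tail_py.1 ≠ pvDiffWitnessOut_dedup_tail_py.2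
def Claim_exact_dedup_tail_py : Prop := ∀ (lines : List String) (n : Int), Dom_dedup_tail_py lines n → D_dedup_tail_py lines n → dedup_tail_py lines n ≠ dedup_tail_py_alt lines n

-- ===== LEMMAS AND PROOFS =====

-- normalization key of a line, as both Pythons compute it
def pvK (line : String) : String :=
  PySem.Str.join " " (PySem.Str.split₀ (PySem.Str.strip line))

-- A's backward dedup scan without the break, over an abstract seen-predicate
def revD (rev : List String) (seen : String → Bool) : List String :=
  match rev with
  | [] => []
  | line :: rest =>
    if PySem.Str.strip line = "" then revD rest seen
    else if seen (pvK line) then revD rest seen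
    else line :: revD rest (fun x => seen x || x == pvK line)

lemma pvK_def (l : String) :
    PySem.Str.join " " (PySem.Str.split₀ (PySem.Str.strip l)) = pvK l := rfl

-- B's loop body, named for the proofs (definitionally the lambda in dedup_tail_py_alt)
def fwdStep (d : PySem.Dict String String) (line : String) : PySem.Dict String String :=
  let stripped := PySem.Str.strip line
  if stripped = "" then d
  else
    let key := PySem.Str.join " " (PySem.Str.split₀ stripped)
    (PySem.Dict.erase d key).insert key line

lemma loopA_eq (n : Int) (rev : List String) : ∀ (seen : PySem.Set String) (res : List String),
    res.length < (max n 1).toNat →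
    dedupTailLoopA rev seen res n
      = res ++ (revD rev (fun x => decide (x ∈ seen))).take ((max n 1).toNat - res.length) := by
  induction rev with
  | nil => intro seen res h; simp [dedupTailLoopA, revD]
  | cons line rest ih =>
    intro seen res h
    by_cases hb : PySem.Str.strip line = ""
    · simpa [dedupTailLoopA, revD, hb] using ih seen res h
    · by_cases hs : PySem.Str.join " " (PySem.Str.split₀ (PySem.Str.strip line)) ∈ seen
      · simpa [dedupTailLoopA, revD, hb, hs, pvK] using ih seen res h
      · have h1 : (1 : Int) ≤ max n 1 := le_max_right n 1
        have hn : n ≤ max n 1 := le_max_left n 1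
        by_cases hbr : n ≤ (res.length : Int) + 1
        · have hM : (max n 1).toNat - res.length = 1 := by
            rcases max_choice n 1 with hm | hm <;> omega
          simp [dedupTailLoopA, revD, hb, hs, pvK, hbr, hM]
        · have h' : (res ++ [line]).length < (max n 1).toNat := by
            simp only [List.length_append, List.length_cons, List.length_nil]
            rcases max_choice n 1 with hm | hm <;> omega
          have h2 := ih (PySem.Set.add seen (pvK line)) (res ++ [line]) h'
          have he : (fun x => decide (x ∈ PySem.Set.add seen (pvK line)))
              = (fun x => decide (x ∈ seen) || x == pvK line) := by
            funext x
            by_cases hx1 : x ∈ seen <;> by_cases hx2 : x = pvK line <;>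
              simp [PySem.Set.mem_add, hx1, hx2]
          rw [he] at h2
          have hsplit : (max n 1).toNat - res.length = ((max n 1).toNat - (res.length + 1)) + 1 := by
            rcases max_choice n 1 with hm | hm <;> omega
          have hA : dedupTailLoopA (line :: rest) seen res n
              = dedupTailLoopA rest (PySem.Set.add seen (pvK line)) (res ++ [line]) n := by
            simp [dedupTailLoopA, hb, hs, pvK, hbr]
          rw [hA, h2, hsplit]
          simp [revD, hb, hs, pvK, List.take_succ_cons, List.append_assoc]

lemma revD_add (rev : List String) : ∀ (seen : String → Bool) (k : String),
    revD rev (fun x => seen x || x == k)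
      = (revD rev seen).filter (fun l => !(pvK l == k)) := by
  induction rev with
  | nil => intro seen k; rfl
  | cons line rest ih =>
    intro seen k
    by_cases hb : PySem.Str.strip line = ""
    · simpa [revD, hb] using ih seen k
    · cases hs : seen (pvK line) with
      | true => simpa [revD, hb, hs] using ih seen k
      | false =>
        cases hk : pvK line == k with
        | true =>
          have hkk : pvK line = k := by simpa using hk
          subst hkk
          have he : (fun x => (seen x || x == pvK line) || x == pvK line)
              = (fun x => seen x || x == pvK line) := by
            funext x; cases seen x <;> cases hxx : x == pvK line <;> simp
          have h2 := ih (fun x => seen x || x == pvK line) (pvK line)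
          rw [he] at h2
          simpa [revD, hb, hs] using h2
        | false =>
          have he : (fun x => (seen x || x == k) || x == pvK line)
              = (fun x => (seen x || x == pvK line) || x == k) := by
            funext x; cases seen x <;> cases x == k <;> cases x == pvK line <;> simp
          have h2 := ih (fun x => seen x || x == pvK line) k
          simp [revD, hb, hs, hk, he, h2]

lemma filterfst {β : Type} (f : β → String) (k : String) :
    ∀ l : List (String × β), (∀ p ∈ l, p.1 = f p.2) →
      (l.filter (fun p => !(p.1 == k))).map (·.2) = (l.map (·.2)).filter (fun v => !(f v == k)) := by
  intro l
  induction l with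
  | nil => intro _; rfl
  | cons p t ih =>
    intro h
    have hp : p.1 = f p.2 := h p (by simp)
    have ht := ih (fun q hq => h q (by simp [hq]))
    by_cases hc : f p.2 = k
    · simp [hp, hc, ht]
    · simp [hp, hc, ht]

lemma inv_fwd (lines : List String) : ∀ (d : PySem.Dict String String),
    (∀ p ∈ d.items, p.1 = pvK p.2) →
    ∀ p ∈ (lines.foldl fwdStep d).items, p.1 = pvK p.2 := by
  induction lines with
  | nil => intro d h; simpa using h
  | cons x t ih =>
    intro d h
    apply ih
    intro p hp
    by_cases hb : PySem.Str.strip x = ""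
    · exact h p (by simpa [fwdStep, hb] using hp)
    · simp only [fwdStep, hb, if_false] at hp
      rcases (PySem.Dict.mem_items_insert _ _ _ p).mp hp with heq | ⟨hmem, _⟩
      · subst heq; rfl
      · have hmem' : p ∈ d.items := by
          have h3 := hmem
          simp only [PySem.Dict.erase] at h3
          exact List.mem_of_mem_filter h3
        exact h p hmem'

lemma values_erase (d : PySem.Dict String String) (k : String)
    (h : ∀ p ∈ d.items, p.1 = pvK p.2) :
    (PySem.Dict.erase d k).values = d.values.filter (fun v => !(pvK v == k)) := by
  have hit : (PySem.Dict.erase d k).items = d.items.filter (fun p => !(p.1 == k)) := by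
    simp [PySem.Dict.erase]
  simp only [PySem.Dict.values, hit]
  exact filterfst pvK k d.items h

lemma take_rev {α : Type} (l : List α) (n : Nat) :
    (l.take n).reverse = l.reverse.drop (l.length - n) := by
  conv_rhs => rw [← List.take_append_drop n l]
  rw [List.reverse_append]
  have hlen : (l.take n ++ l.drop n).length - n = ((l.drop n).reverse).length := by
    simp only [List.length_append, List.length_take, List.length_drop, List.length_reverse]
    omega
  rw [hlen, List.drop_left]

lemma core (lines : List String) :
    (lines.foldl fwdStep PySem.Dict.empty).values
      = (revD lines.reverse (fun _ => false)).reverse := by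
  induction lines using List.reverseRecOn with
  | nil => rfl
  | append_singleton init x ih =>
    rw [List.foldl_append]
    have hrev : (init ++ [x]).reverse = x :: init.reverse := by simp
    by_cases hb : PySem.Str.strip x = ""
    · simp only [List.foldl_cons, List.foldl_nil, fwdStep, hb, if_true, hrev, revD]
      exact ih
    · have hinv := inv_fwd init PySem.Dict.empty (by simp [PySem.Dict.empty])
      have hc : (PySem.Dict.erase (init.foldl fwdStep PySem.Dict.empty) (pvK x)).contains (pvK x) = false := by
        simp [PySem.Dict.erase, PySem.Dict.contains]
      have hitems := PySem.Dict.items_insert_of_not_contains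
        (PySem.Dict.erase (init.foldl fwdStep PySem.Dict.empty) (pvK x)) (v := x) hc
      have hvals : ((PySem.Dict.erase (init.foldl fwdStep PySem.Dict.empty) (pvK x)).insert (pvK x) x).values
          = (PySem.Dict.erase (init.foldl fwdStep PySem.Dict.empty) (pvK x)).values ++ [x] := by
        simp only [PySem.Dict.values, hitems]; simp
      have hadd : (revD init.reverse fun x_1 => x_1 == pvK x)
          = List.filter (fun l => !(pvK l == pvK x)) (revD init.reverse fun _ => false) := by
        simpa using revD_add init.reverse (fun _ => false) (pvK x)
      simp only [List.foldl_cons, List.foldl_nil, fwdStep, hb, if_false, hrev, revD]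
      simp only [pvK_def]
      rw [hvals, values_erase _ _ hinv, ih]
      simp [hadd, List.filter_reverse]

lemma revD_blank (rev : List String) (seen : String → Bool)
    (h : ∀ l ∈ rev, PySem.Str.strip l = "") : revD rev seen = [] := by
  induction rev generalizing seen with
  | nil => rfl
  | cons line rest ih =>
    have hb : PySem.Str.strip line = "" := h line (by simp)
    simp [revD, hb, ih _ (fun l hl => h l (by simp [hl]))]

lemma revD_nonblank (rev : List String)
    (h : ∃ l ∈ rev, ¬ PySem.Str.strip l = "") : revD rev (fun _ => false) ≠ [] := by
  induction rev with
  | nil => simp at h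
  | cons line rest ih =>
    by_cases hb : PySem.Str.strip line = ""
    · rcases h with ⟨l, hl, hns⟩
      rcases List.mem_cons.mp hl with rfl | hl'
      · exact absurd hb hns
      · simpa [revD, hb] using ih ⟨l, hl', hns⟩
    · simp [revD, hb]

-- ===== VERDICT (by name: the statement is the Claim_ definition above) =====
theorem dedup_tail_py_spec : Claim_unchanged_dedup_tail_py := by
  intro lines n _ hD
  unfold dedup_tail_py dedup_tail_py_alt
  by_cases hpos : n ≤ 0
  · have hblank : ∀ l ∈ lines, PySem.Str.strip l = "" := by
      intro l hl
      by_contra hns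
      exact hD ⟨hpos, List.any_eq_true.mpr ⟨l, hl, by simpa using hns⟩⟩
    have h1 : (1 : Int) ≤ max n 1 := le_max_right n 1
    have hM0 : 0 < (max n 1).toNat := by omega
    rw [loopA_eq n lines.reverse PySem.Set.empty [] (by simpa using hM0)]
    rw [revD_blank _ _ (fun l hl => hblank l (List.mem_reverse.mp hl))]
    simp [hpos]
  · have hpos' : 0 < n := by omega
    have h1 : (1 : Int) ≤ max n 1 := le_max_right n 1
    have hn : n ≤ max n 1 := le_max_left n 1
    have hM0 : 0 < (max n 1).toNat := by omega
    have hemp : (fun x => decide (x ∈ (PySem.Set.empty : PySem.Set String))) = (fun _ : String => false) := by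
      funext x; simp [PySem.Set.empty]
    rw [loopA_eq n lines.reverse PySem.Set.empty [] (by simpa using hM0)]
    rw [hemp]
    have hfold : (lines.foldl (fun d line =>
        let stripped := PySem.Str.strip line
        if stripped = "" then d
        else
          let key := PySem.Str.join " " (PySem.Str.split₀ stripped)
          (PySem.Dict.erase d key).insert key line) (PySem.Dict.empty : PySem.Dict String String))
        = lines.foldl fwdStep PySem.Dict.empty := rfl
    have hps : ¬ n ≤ 0 := by omega
    simp only [hps, if_false, hfold, core, List.nil_append, List.length_nil, Nat.sub_zero]
    have hk : -n = -((((max n 1).toNat : Nat)) : Int) := by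
      rcases max_choice n 1 with hm | hm <;> omega
    rw [hk, PySem.List.slice_from_neg_natCast
      ((revD lines.reverse fun _ => false).reverse) ((max n 1).toNat) hM0]
    rw [List.length_reverse, take_rev]

theorem dedup_tail_py_changed : Claim_changed_dedup_tail_py := by
  unfold Claim_changed_dedup_tail_py; decide

theorem dedup_tail_py_tight : Claim_exact_dedup_tail_py := by
  intro lines n _ hD
  rcases hD with ⟨hpos, hany⟩
  rcases List.any_eq_true.mp hany with ⟨l, hl, hns⟩
  have hex : ∃ l ∈ lines.reverse, ¬ PySem.Str.strip l = "" :=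
    ⟨l, List.mem_reverse.mpr hl, by simpa using hns⟩
  have hne := revD_nonblank lines.reverse hex
  have hM1 : (max n 1).toNat = 1 := by
    rcases max_choice n 1 with hm | hm <;> omega
  unfold dedup_tail_py dedup_tail_py_alt
  rw [loopA_eq n lines.reverse PySem.Set.empty [] (by simp [hM1])]
  have hemp : (fun x => decide (x ∈ (PySem.Set.empty : PySem.Set String))) = (fun _ : String => false) := by
    funext x; simp [PySem.Set.empty]
  rw [hemp]
  simp only [hpos, if_true, List.nil_append, List.length_nil, Nat.sub_zero, hM1]
  cases hcase : revD lines.reverse (fun _ => false) with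
  | nil => exact absurd hcase hne
  | cons a t => simp [List.take]
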